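-- pv_equiv track=rewrite | github.com/Dospalko/AnnotationTool | backend/routes/extract.py | merge_solo_tags
-- ===== SOURCE A (Python) =====
-- def merge_solo_tags(lines, tags):
--     # Base case: If no lines or only one line, no merging is needed
--     if not lines or len(lines) == 1:
--         return lines
--
--     # Function to merge tags recursively
--     def recursive_merge(lines, iteration, tags):
--         if iteration == 2:  # Stop after two iterations to prevent infinite recursion
--             return lines
--
--         merged_lines = []
--         skip_next = False  # To skip blank lines after moving an ending tag
--
--         for i, line in enumerate(lines):
--             if skip_next:
--                 skip_next = False  # Reset skip flag
--                 continue
--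
--             # Flag to indicate if any tag's ending was moved
--             moved_tag = False
--
--             for tag in tags:
--                 close_tag = f"</{tag}>"
--                 open_tag = f"<{tag}>"
--
--                 # Check if line is just an ending tag or starts with an ending tag
--                 if line.strip() == close_tag or (i > 0 and line.startswith(close_tag)):
--                     # Append ending tag to the end of the previous non-blank line
--                     for j in range(len(merged_lines)-1, -1, -1):
--                         if merged_lines[j].strip() != "":
--                             merged_lines[j] = merged_lines[j] + close_tag
--                             moved_tag = True
--                             break
--
--                     # If the line has content beyond the closing tag, add that content as a new line
--                     if line.strip() != close_tag:
--                         new_line = line.replace(close_tag, "", 1).strip()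
--                         if new_line:
--                             merged_lines.append(new_line)
--
--                     # If a blank line follows, skip it in the next iteration
--                     if i < len(lines) - 1 and lines[i+1].strip() == "":
--                         skip_next = True
--                     break  # Break after handling the first matching tag
--
--             if not moved_tag and not skip_next:  # If no tag was moved and next line is not to be skipped
--                 merged_lines.append(line)
--
--         # Recursive call with incremented iteration
--         return recursive_merge(merged_lines, iteration + 1, tags)
--
--     # Start the recursive merging process
--     return recursive_merge(lines, 0, tags)
-- ===== SOURCE B (Python) =====
-- def merge_solo_tags(lines, tags):
--     if len(lines) < 2:
--         return lines
--
--     closes = ["</%s>" % t for t in tags]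
--
--     def one_pass(lines):
--         merged = []
--         last = -1          # index in merged of the last non-blank line; -1 if none yet
--         skip = False
--         for i, line in enumerate(lines):
--             if skip:
--                 skip = False
--                 continue
--             stripped = line.strip()
--             close = next((c for c in closes
--                           if stripped == c or (i > 0 and line.startswith(c))), None)
--             if close is None:
--                 merged.append(line)
--                 if stripped != "":
--                     last = len(merged) - 1
--                 continue
--             moved = last >= 0
--             if moved:
--                 merged[last] = merged[last] + close
--             if stripped != close:
--                 rest = line.replace(close, "", 1).strip()
--                 if rest:
--                     merged.append(rest)
--                     last = len(merged) - 1
--             skip = i + 1 < len(lines) and lines[i + 1].strip() == ""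
--             if not moved and not skip:
--                 merged.append(line)
--                 last = len(merged) - 1
--         return merged
--
--     return one_pass(one_pass(lines))
-- ===== Notes on version B (the rewrite author's own statement) =====
-- stated objective: alternative
-- what changed: B replaces A's per-line backward rescan of the merged list (to find the last non-blank line) with an incrementally maintained last-non-blank index, replaces the inner first-matching-tag loop by a next() search over precomputed closing tags, and unrolls the two-iteration recursion into two sequential passes; intended as faster (measured ~1.7x at n=1024 but unconfirmed at the largest size).
import Mathlib
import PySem

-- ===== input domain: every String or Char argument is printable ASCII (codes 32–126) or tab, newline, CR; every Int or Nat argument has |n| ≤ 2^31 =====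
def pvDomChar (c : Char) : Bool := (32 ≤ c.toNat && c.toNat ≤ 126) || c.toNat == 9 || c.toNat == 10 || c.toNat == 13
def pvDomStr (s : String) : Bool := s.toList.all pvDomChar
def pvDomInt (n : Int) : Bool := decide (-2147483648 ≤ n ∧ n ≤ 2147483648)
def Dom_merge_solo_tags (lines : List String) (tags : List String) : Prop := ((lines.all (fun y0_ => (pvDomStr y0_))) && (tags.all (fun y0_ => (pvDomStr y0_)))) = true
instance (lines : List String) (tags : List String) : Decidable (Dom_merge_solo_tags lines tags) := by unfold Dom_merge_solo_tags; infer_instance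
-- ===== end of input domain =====

-- B replaces A's backward rescan of the merged list per moved tag by an incrementally
-- maintained index of the last non-blank merged line, and unrolls the two-iteration
-- recursion into two sequential passes; same return value everywhere (objective: alternative).

-- ===== PORT A =====
-- f"</{tag}>"   (shared by both ports: both Pythons format the closing tag this way)
def pvCloseTag (tag : String) : String := "</" ++ tag ++ ">"

-- s.replace(old, "", 1) — exact: removes the first occurrence of old if present
-- (for old = "" Python inserts "" at position 0, i.e. returns s; find "" = 0 gives the same).
-- Shared helper: both Pythons call line.replace(close_tag, "", 1).
def pvReplace1 (s old : String) : String :=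
  let i := PySem.Chars.find s.toList old.toList
  if i = -1 then s
  else String.ofList (s.toList.take i.toNat ++ s.toList.drop (i.toNat + old.toList.length))

-- the inner 'for j in range(len(merged_lines)-1, -1, -1): … break' backward scan of A
def pvBackScanGo (idxs : List Int) (merged : List String) (close : String) : List String × Bool :=
  match idxs with
  | [] => (merged, false)
  | j :: rest =>
    if PySem.Str.strip (PySem.List.pyGetD merged j "") == "" then
      pvBackScanGo rest merged close
    else
      (PySem.List.pySetD merged j (PySem.List.pyGetD merged j "" ++ close), true)

def pvBackScan (merged : List String) (close : String) : List String × Bool :=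
  pvBackScanGo (PySem.List.pyRange ((merged.length : Int) - 1) (-1) (-1)) merged close

-- A's 'for tag in tags: … break' loop body; returns (merged_lines, moved_tag, skip_next)
def pvTagLoopA (tags : List String) (merged : List String) (lines : List String) (i : Int) (line : String) : List String × Bool × Bool :=
  match tags with
  | [] => (merged, false, false)
  | tag :: rest =>
    let close := pvCloseTag tag
    if PySem.Str.strip line == close || (decide (0 < i) && PySem.Str.startswith line close) then
      let r := pvBackScan merged close
      let m2 :=
        if PySem.Str.strip line == close then r.1
        else
          let nl := PySem.Str.strip (pvReplace1 line close)
          if nl == "" then r.1 else r.1 ++ [nl]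
      -- 'if i < len(lines) - 1 and lines[i+1].strip() == ""' — the guard keeps i+1 in range, getD default unreachable
      let skip := decide (i < (lines.length : Int) - 1) && (PySem.Str.strip (PySem.List.pyGetD lines (i + 1) "") == "")
      (m2, r.2, skip)
    else pvTagLoopA rest merged lines i line

-- one body of A's 'for i, line in enumerate(lines)' loop; state = (merged_lines, skip_next)
def pvStepA (lines : List String) (tags : List String) (st : List String × Bool) (it : Int × String) : List String × Bool :=
  if st.2 then (st.1, false)
  else
    let r := pvTagLoopA tags st.1 lines it.1 it.2
    (if !r.2.1 && !r.2.2 then r.1 ++ [it.2] else r.1, r.2.2)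

def pvPassA (lines : List String) (tags : List String) : List String :=
  ((PySem.List.enumerate lines 0).foldl (pvStepA lines tags) ([], false)).1

-- recursive_merge(lines, iteration, tags); Python counts iteration 0,1 up to the stop value 2,
-- ported structurally as the remaining count fuel = 2 - iteration (fuel 0 ↔ iteration == 2)
def pvRecMergeA (fuel : Nat) (lines : List String) (tags : List String) : List String :=
  match fuel with
  | 0 => lines
  | n + 1 => pvRecMergeA n (pvPassA lines tags) tags

def merge_solo_tags (lines : List String) (tags : List String) : List String :=
  if lines.isEmpty || lines.length == 1 then lines
  else pvRecMergeA 2 lines tags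

-- ===== PORT B =====
-- next((c for c in closes if stripped == c or (i > 0 and line.startswith(c))), None)
def pvFindClose (closes : List String) (stripped : String) (line : String) (i : Int) : Option String :=
  match closes with
  | [] => none
  | c :: rest =>
    if stripped == c || (decide (0 < i) && PySem.Str.startswith line c) then some c
    else pvFindClose rest stripped line i

-- one body of B's loop; state = (merged, last, skip) where last tracks the last non-blank index
def pvStepB (lines : List String) (closes : List String) (st : List String × Int × Bool) (it : Int × String) : List String × Int × Bool :=
  if st.2.2 then (st.1, st.2.1, false)
  else
    let merged := st.1
    let last := st.2.1
    let stripped := PySem.Str.strip it.2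
    match pvFindClose closes stripped it.2 it.1 with
    | none =>
      (merged ++ [it.2], if stripped == "" then last else (merged.length : Int), false)
    | some close =>
      let moved := decide (0 ≤ last)
      let m1 := if moved then PySem.List.pySetD merged last (PySem.List.pyGetD merged last "" ++ close) else merged
      let p :=
        if stripped == close then (m1, last)
        else
          let rest := PySem.Str.strip (pvReplace1 it.2 close)
          if rest == "" then (m1, last) else (m1 ++ [rest], (m1.length : Int))
      -- 'skip = i + 1 < len(lines) and lines[i+1].strip() == ""' — guard keeps i+1 in range
      let skip := decide (it.1 + 1 < (lines.length : Int)) && (PySem.Str.strip (PySem.List.pyGetD lines (it.1 + 1) "") == "")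
      if !moved && !skip then (p.1 ++ [it.2], (p.1.length : Int), skip)
      else (p.1, p.2, skip)

def pvPassB (lines : List String) (closes : List String) : List String :=
  ((PySem.List.enumerate lines 0).foldl (pvStepB lines closes) ([], -1, false)).1

def merge_solo_tags_alt (lines : List String) (tags : List String) : List String :=
  if lines.length < 2 then lines
  else
    let closes := tags.map pvCloseTag
    pvPassB (pvPassB lines closes) closes

-- ===== PRECONDITION & SPEC =====
def Spec_merge_solo_tags (lines : List String) (tags : List String) (out : List String) : Prop := out = merge_solo_tags_alt lines tags
instance (lines : List String) (tags : List String) (out : List String) : Decidable (Spec_merge_solo_tags lines tags out) := by unfold Spec_merge_solo_tags; infer_instance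

-- ===== CLAIM (what is proved, stated in full; the proofs are below) =====
def Claim_equal_merge_solo_tags : Prop := ∀ (lines : List String) (tags : List String), Dom_merge_solo_tags lines tags → Spec_merge_solo_tags lines tags (merge_solo_tags lines tags)

-- ===== LEMMAS AND PROOFS =====

-- index (as Python int, -1 if none) of the last non-blank line of m — the quantity B's 'last' tracks
def pvLnbAux (m : List String) (i : Int) (acc : Int) : Int :=
  match m with
  | [] => acc
  | x :: r => pvLnbAux r (i + 1) (if PySem.Str.strip x == "" then acc else i)

def pvLnb (m : List String) : Int := pvLnbAux m 0 (-1)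

theorem pvLnbAux_snoc (l : List String) (x : String) (i acc : Int) :
    pvLnbAux (l ++ [x]) i acc
      = if PySem.Str.strip x == "" then pvLnbAux l i acc else i + l.length := by
  induction l generalizing i acc with
  | nil => simp [pvLnbAux]
  | cons y r ih =>
    simp only [List.cons_append, pvLnbAux, ih]
    split <;> simp <;> try ring

theorem pvLnb_snoc (m : List String) (x : String) :
    pvLnb (m ++ [x]) = if PySem.Str.strip x == "" then pvLnb m else (m.length : Int) := by
  simp [pvLnb, pvLnbAux_snoc]

theorem pvLnbAux_bounds (m : List String) (i acc : Int) (h1 : -1 ≤ acc) (h2 : acc < i) :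
    -1 ≤ pvLnbAux m i acc ∧ pvLnbAux m i acc < i + m.length := by
  induction m generalizing i acc with
  | nil => simpa [pvLnbAux] using ⟨h1, by omega⟩
  | cons y r ih =>
    simp only [pvLnbAux]
    have := ih (i + 1) (if PySem.Str.strip y == "" then acc else i) (by split <;> omega) (by split <;> omega)
    simp only [List.length_cons]
    push_cast
    omega

theorem pvLnb_lt_length (m : List String) : pvLnb m < (m.length : Int) := by
  have := pvLnbAux_bounds m 0 (-1) (by omega) (by omega)
  simpa [pvLnb] using this.2

theorem pvMemDropWhile {α : Type} (p : α → Bool) (l : List α) (c : α) (h : c ∈ l) (hp : p c = false) :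
    c ∈ l.dropWhile p := by
  induction l with
  | nil => simp at h
  | cons y r ih =>
    rw [List.dropWhile_cons]
    by_cases hy : p y = true
    · simp [hy]
      rcases List.mem_cons.mp h with h | h
      · subst h; simp [hy] at hp
      · exact ih h
    · simp at hy
      simpa [hy] using h

theorem pvHeadDropWhile {α : Type} (p : α → Bool) (l : List α) (c : α) (t : List α)
    (h : l.dropWhile p = c :: t) : p c = false := by
  induction l with
  | nil => simp at h
  | cons y r ih =>
    rw [List.dropWhile_cons] at h
    by_cases hy : p y = true
    · simp [hy] at h; exact ih h
    · simp at hy; simp [hy] at h; rw [← h.1]; exact hy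

-- strip s ≠ "" whenever s contains a non-whitespace character
theorem pvStrip_ne_empty (s : String) (c : Char) (hc : c ∈ s.toList)
    (hsp : PySem.Chars.isspace c = false) : (PySem.Str.strip s == "") = false := by
  rw [beq_eq_false_iff_ne]
  intro h
  have h2 : PySem.Chars.strip s.toList = [] := by
    have := PySem.Str.toList_strip s
    rw [h] at this
    simpa using this.symm
  unfold PySem.Chars.strip PySem.Chars.rstrip PySem.Chars.lstrip at h2
  have h3 : List.dropWhile PySem.Chars.isspace (List.dropWhile PySem.Chars.isspace s.toList).reverse = [] := by
    simpa using congrArg List.reverse h2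
  rw [List.dropWhile_eq_nil_iff] at h3
  have hc2 : c ∈ List.dropWhile PySem.Chars.isspace s.toList := pvMemDropWhile _ _ _ hc hsp
  have := h3 c (by simpa using hc2)
  simp [hsp] at this

theorem pvStrip_strip (z : String) (h : (PySem.Str.strip z == "") = false) :
    (PySem.Str.strip (PySem.Str.strip z) == "") = false := by
  rw [beq_eq_false_iff_ne] at h
  have hnil : PySem.Chars.strip z.toList ≠ [] := by
    intro h2
    apply h
    have : (PySem.Str.strip z).toList = [] := by rw [PySem.Str.toList_strip, h2]
    exact String.toList_eq_nil_iff.mp this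
  -- strip z = rstrip (lstrip z); its head is the head of lstrip z, a non-space character
  obtain ⟨c, t, hct⟩ : ∃ c t, PySem.Chars.strip z.toList = c :: t := by
    cases hx : PySem.Chars.strip z.toList with
    | nil => exact absurd hx hnil
    | cons c t => exact ⟨c, t, rfl⟩
  have hpre : PySem.Chars.strip z.toList <+: PySem.Chars.lstrip z.toList := by
    unfold PySem.Chars.strip PySem.Chars.rstrip
    have hsuf := List.dropWhile_suffix (l := (PySem.Chars.lstrip z.toList).reverse) PySem.Chars.isspace
    have : (List.dropWhile PySem.Chars.isspace (PySem.Chars.lstrip z.toList).reverse).reverse <+: (PySem.Chars.lstrip z.toList).reverse.reverse :=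
      List.reverse_prefix.mpr (by simpa using hsuf)
    simpa using this
  have hcsp : PySem.Chars.isspace c = false := by
    rw [hct] at hpre
    obtain ⟨t2, ht2⟩ := hpre
    exact pvHeadDropWhile PySem.Chars.isspace z.toList c _ ht2.symm
  have hcmem : c ∈ (PySem.Str.strip z).toList := by
    rw [PySem.Str.toList_strip, hct]; simp
  exact pvStrip_ne_empty _ c hcmem hcsp

theorem pvMemClose (t : String) : '<' ∈ (pvCloseTag t).toList := by
  simp [pvCloseTag]

theorem pvStrip_append_close (s t : String) :
    (PySem.Str.strip (s ++ pvCloseTag t) == "") = false := by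
  apply pvStrip_ne_empty _ '<'
  · simp [pvCloseTag]
  · decide

theorem pvClose_ne_empty (t : String) : ((pvCloseTag t : String) == "") = false := by
  rw [beq_eq_false_iff_ne]
  intro h
  have := congrArg String.toList h
  simp [pvCloseTag] at this

theorem pvStrip_line_matched (line : String) (t : String) (i : Int)
    (h : (PySem.Str.strip line == pvCloseTag t || (decide (0 < i) && PySem.Str.startswith line (pvCloseTag t))) = true) :
    (PySem.Str.strip line == "") = false := by
  rcases Bool.or_eq_true_iff.mp h with h1 | h1
  · have he : PySem.Str.strip line = pvCloseTag t := by simpa using h1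
    rw [he]; exact pvClose_ne_empty t
  · have hs : PySem.Str.startswith line (pvCloseTag t) = true := (Bool.and_eq_true_iff.mp h1).2
    have hp : (pvCloseTag t).toList <+: line.toList := by
      rw [PySem.Str.startswith_eq] at hs
      exact (PySem.Chars.startswith_iff _ _).mp hs
    exact pvStrip_ne_empty _ '<' (hp.subset (pvMemClose t)) (by decide)

-- the backward rescan computes exactly "append close at index pvLnb m"
theorem pvBackScanGo_snoc (idxs : List Int) (m : List String) (x : String) (c : String)
    (h : ∀ j ∈ idxs, 0 ≤ j ∧ j < (m.length : Int)) :
    pvBackScanGo idxs (m ++ [x]) c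
      = ((pvBackScanGo idxs m c).1 ++ [x], (pvBackScanGo idxs m c).2) := by
  induction idxs with
  | nil => simp [pvBackScanGo]
  | cons j rest ih =>
    obtain ⟨hj0, hjlt⟩ := h j (by simp)
    have hjn : j.toNat < m.length := by omega
    have hget : PySem.List.pyGetD (m ++ [x]) j "" = PySem.List.pyGetD m j "" := by
      rw [PySem.List.pyGetD_of_nonneg _ _ hj0, PySem.List.pyGetD_of_nonneg _ _ hj0,
          List.getD_append _ _ _ _ hjn]
    simp only [pvBackScanGo, hget]
    split
    · exact ih (fun j hj => h j (by simp [hj]))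
    · rw [PySem.List.pySetD_of_nonneg _ _ hj0, PySem.List.pySetD_of_nonneg _ _ hj0,
          List.set_append_left _ _ hjn]

theorem pvBackScan_eq (m : List String) (c : String) :
    pvBackScan m c
      = if 0 ≤ pvLnb m then
          (PySem.List.pySetD m (pvLnb m) (PySem.List.pyGetD m (pvLnb m) "" ++ c), true)
        else (m, false) := by
  induction m using List.reverseRecOn with
  | nil =>
    have h0 : pvLnb ([] : List String) = -1 := rfl
    simp [pvBackScan, h0, pvBackScanGo]
  | append_singleton m x ih =>
    have hlen : (((m ++ [x]).length : Int)) - 1 = (m.length : Int) := by simp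
    have hget : PySem.List.pyGetD (m ++ [x]) (m.length : Int) "" = x := by
      rw [PySem.List.pyGetD_of_nonneg _ _ (by omega)]
      simp
    unfold pvBackScan
    rw [hlen, PySem.List.pyRange_neg_one_cons (by omega : (-1:Int) < (m.length : Int))]
    simp only [pvBackScanGo, hget]
    by_cases hx : (PySem.Str.strip x == "") = true
    · rw [if_pos hx]
      have hmem : ∀ j ∈ PySem.List.pyRange ((m.length : Int) - 1) (-1) (-1), 0 ≤ j ∧ j < (m.length : Int) := by
        intro j hj
        rw [PySem.List.mem_pyRange_neg_one] at hj
        omega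
      rw [pvBackScanGo_snoc _ _ _ _ hmem]
      have ihb : pvBackScanGo (PySem.List.pyRange ((m.length : Int) - 1) (-1) (-1)) m c = pvBackScan m c := rfl
      rw [ihb, ih, pvLnb_snoc, if_pos hx]
      by_cases h0 : 0 ≤ pvLnb m
      · have hlt := pvLnb_lt_length m
        have htn : (pvLnb m).toNat < m.length := by omega
        rw [if_pos h0, if_pos h0]
        have hg2 : PySem.List.pyGetD (m ++ [x]) (pvLnb m) "" = PySem.List.pyGetD m (pvLnb m) "" := by
          rw [PySem.List.pyGetD_of_nonneg _ _ h0, PySem.List.pyGetD_of_nonneg _ _ h0,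
              List.getD_append _ _ _ _ htn]
        rw [hg2, PySem.List.pySetD_of_nonneg _ _ h0, PySem.List.pySetD_of_nonneg _ _ h0,
            List.set_append_left _ _ htn]
      · rw [if_neg h0, if_neg h0]
    · rw [if_neg hx, pvLnb_snoc, if_neg hx]
      rw [if_pos (by omega : (0:Int) ≤ (m.length : Int))]
      rw [hget]

-- overwriting the last non-blank entry with a non-blank value keeps the index
theorem pvLnb_set (m : List String) (y : String) (h0 : 0 ≤ pvLnb m)
    (hy : (PySem.Str.strip y == "") = false) :
    pvLnb (PySem.List.pySetD m (pvLnb m) y) = pvLnb m := by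
  induction m using List.reverseRecOn with
  | nil => simp [pvLnb, pvLnbAux] at h0
  | append_singleton m x ih =>
    by_cases hx : (PySem.Str.strip x == "") = true
    · rw [pvLnb_snoc, if_pos hx] at h0 ⊢
      have hlt := pvLnb_lt_length m
      have htn : (pvLnb m).toNat < m.length := by omega
      rw [PySem.List.pySetD_of_nonneg _ _ h0, List.set_append_left _ _ htn,
          ← PySem.List.pySetD_of_nonneg m _ h0, pvLnb_snoc, if_pos hx, ih h0]
    · rw [pvLnb_snoc, if_neg hx]
      have ht : ((m.length : Int)).toNat = m.length := by omega
      rw [PySem.List.pySetD_of_nonneg _ _ (by omega), List.set_append, ht,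
          if_neg (lt_irrefl m.length), Nat.sub_self]
      show pvLnb (m ++ [y]) = (m.length : Int)
      rw [pvLnb_snoc, if_neg (by simp [hy])]

theorem pvFindClose_mem_cond (closes : List String) (s l : String) (i : Int) (c : String)
    (h : pvFindClose closes s l i = some c) :
    c ∈ closes ∧ (s == c || (decide (0 < i) && PySem.Str.startswith l c)) = true := by
  induction closes with
  | nil => simp [pvFindClose] at h
  | cons c0 rest ih =>
    rw [pvFindClose] at h
    by_cases hc : (s == c0 || (decide (0 < i) && PySem.Str.startswith l c0)) = true
    · rw [if_pos hc] at h
      obtain rfl := Option.some.inj h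
      exact ⟨by simp, hc⟩
    · rw [if_neg hc] at h
      obtain ⟨h1, h2⟩ := ih h
      exact ⟨by simp [h1], h2⟩

-- A's tag loop, expressed through B's first-match search
theorem pvTagLoopA_eq_find (tags : List String) (m lines : List String) (i : Int) (line : String) :
    pvTagLoopA tags m lines i line
      = match pvFindClose (tags.map pvCloseTag) (PySem.Str.strip line) line i with
        | none => (m, false, false)
        | some close =>
          let r := pvBackScan m close
          let m2 :=
            if PySem.Str.strip line == close then r.1
            else
              let nl := PySem.Str.strip (pvReplace1 line close)
              if nl == "" then r.1 else r.1 ++ [nl]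
          let skip := decide (i < (lines.length : Int) - 1) && (PySem.Str.strip (PySem.List.pyGetD lines (i + 1) "") == "")
          (m2, r.2, skip) := by
  induction tags with
  | nil => simp [pvTagLoopA, pvFindClose]
  | cons tag rest ih =>
    simp only [pvTagLoopA, List.map_cons, pvFindClose]
    by_cases hc : (PySem.Str.strip line == pvCloseTag tag || (decide (0 < i) && PySem.Str.startswith line (pvCloseTag tag))) = true
    · rw [if_pos hc, if_pos hc]
    · rw [if_neg hc, if_neg hc]
      exact ih

set_option maxHeartbeats 1600000 in
theorem pvStep_corr (lines tags : List String) (m : List String) (skip : Bool) (it : Int × String) :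
    pvStepB lines (tags.map pvCloseTag) (m, pvLnb m, skip) it
      = ((pvStepA lines tags (m, skip) it).1, pvLnb (pvStepA lines tags (m, skip) it).1,
         (pvStepA lines tags (m, skip) it).2) := by
  by_cases hskip : skip = true
  · simp [pvStepA, pvStepB, hskip]
  · have hskip' : skip = false := by simpa using hskip
    subst hskip'
    simp only [pvStepA, pvStepB, Bool.false_eq_true, if_false]
    rw [pvTagLoopA_eq_find]
    cases hfc : pvFindClose (tags.map pvCloseTag) (PySem.Str.strip it.2) it.2 it.1 with
    | none =>
      by_cases hb : (PySem.Str.strip it.2 == "") = true <;> simp [hb, pvLnb_snoc]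
    | some close =>
      obtain ⟨hmem, hcond⟩ := pvFindClose_mem_cond _ _ _ _ _ hfc
      obtain ⟨t, ht, rfl⟩ := List.mem_map.mp hmem
      have hline : (PySem.Str.strip it.2 == "") = false := pvStrip_line_matched it.2 t it.1 hcond
      have hdec : decide (it.1 + 1 < (lines.length : Int)) = decide (it.1 < (lines.length : Int) - 1) :=
        decide_eq_decide.mpr (by omega)
      have hA : 0 ≤ pvLnb m → pvLnb (PySem.List.pySetD m (pvLnb m) (PySem.List.pyGetD m (pvLnb m) "" ++ pvCloseTag t)) = pvLnb m :=
        fun h0 => pvLnb_set m _ h0 (pvStrip_append_close _ t)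
      have hB : (PySem.Str.strip (pvReplace1 it.2 (pvCloseTag t)) == "") = false →
          (PySem.Str.strip (PySem.Str.strip (pvReplace1 it.2 (pvCloseTag t))) == "") = false :=
        fun h => pvStrip_strip _ h
      simp only [pvBackScan_eq, hdec]
      set C := pvCloseTag t with hC
      set R := PySem.Str.strip (pvReplace1 it.2 C) with hR
      set G := PySem.List.pyGetD m (pvLnb m) "" with hG
      set K := (decide (it.1 < (lines.length : Int) - 1) && (PySem.Str.strip (PySem.List.pyGetD lines (it.1 + 1) "") == "")) with hK
      clear hfc hcond hmem ht
      clear hC hR hG hK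
      clear_value C R G K
      by_cases h0 : 0 ≤ pvLnb m
      · by_cases hsc : (PySem.Str.strip it.2 == C) = true
        · simp [h0, hsc, hA h0]
        · by_cases hrest : (R == "") = true
          · simp [h0, hsc, hrest, hA h0]
          · simp [h0, hsc, hrest, pvLnb_snoc, hB (by simpa using hrest)]
      · by_cases hk : K = true
        all_goals by_cases hsc : (PySem.Str.strip it.2 == C) = true
        all_goals by_cases hrest : (R == "") = true
        all_goals simp [h0, hsc, hk, hrest, pvLnb_snoc, hline]
        all_goals (have hB' : ¬ PySem.Str.strip R = "" := by simpa using hB (by simpa using hrest))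
        all_goals try (intro he; exact absurd he hB')
        all_goals
          (rw [show m ++ [R, it.2] = (m ++ [R]) ++ [it.2] from by simp, pvLnb_snoc, pvLnb_snoc]
           simp [hline])

theorem pvFold_corr (lines tags : List String) (items : List (Int × String)) (m : List String) (skip : Bool) :
    items.foldl (pvStepB lines (tags.map pvCloseTag)) (m, pvLnb m, skip)
      = ((items.foldl (pvStepA lines tags) (m, skip)).1,
         pvLnb (items.foldl (pvStepA lines tags) (m, skip)).1,
         (items.foldl (pvStepA lines tags) (m, skip)).2) := by
  induction items generalizing m skip with
  | nil => simp
  | cons it rest ih =>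
    simp only [List.foldl_cons]
    rw [pvStep_corr]
    simpa using ih (pvStepA lines tags (m, skip) it).1 (pvStepA lines tags (m, skip) it).2

theorem pvPass_corr (lines tags : List String) : pvPassB lines (tags.map pvCloseTag) = pvPassA lines tags := by
  show (List.foldl (pvStepB lines (tags.map pvCloseTag)) ([], -1, false) (PySem.List.enumerate lines 0)).1 = _
  rw [show ((-1 : Int)) = pvLnb [] from rfl, pvFold_corr]
  rfl

-- ===== VERDICT (by name: the statement is the Claim_ definition above) =====
theorem merge_solo_tags_spec : Claim_equal_merge_solo_tags := by
  intro lines tags _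
  show merge_solo_tags lines tags = merge_solo_tags_alt lines tags
  unfold merge_solo_tags merge_solo_tags_alt
  by_cases h : lines.length < 2
  · have h1 : (lines.isEmpty || lines.length == 1) = true := by
      cases lines with
      | nil => simp
      | cons a l => simp at h ⊢; omega
    rw [if_pos (by simpa using h1), if_pos h]
  · have h1 : (lines.isEmpty || lines.length == 1) = false := by
      cases lines with
      | nil => simp at h
      | cons a l => simp at h ⊢; omega
    rw [if_neg (by simp [h1]), if_neg h]
    show pvRecMergeA 2 lines tags = pvPassB (pvPassB lines (tags.map pvCloseTag)) (tags.map pvCloseTag)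
    rw [pvPass_corr lines tags, pvPass_corr (pvPassA lines tags) tags]
    rfl
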